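-- pv_equiv track=rewrite | github.com/ZJUIDG-AIVA/ExChart-Bench | src/csv_utils.py | csv_shape_check
-- ===== SOURCE A (Python) =====
-- def csv_shape_check(pred_rows, gt_rows):
--     # check if the predicted csv has different length in each row
--     if not pred_rows or not pred_rows[0]:
--         return False
--
--     # check if each row has the same number of fields
--     num_fields = len(pred_rows[0])
--     if False in [len(r) == num_fields for r in pred_rows]:
--         return False
--
--     # check if the shape of predicted csv matches the ground truth csv
--     if len(pred_rows) != len(gt_rows) or any(
--         len(pred_rows[i]) != len(gt_rows[i]) for i in range(len(gt_rows))
--     ):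
--         return False
--
--     return True
-- ===== SOURCE B (Python) =====
-- def csv_shape_check(pred_rows, gt_rows):
--     if not pred_rows or not pred_rows[0]:
--         return False
--     w = len(pred_rows[0])
--     # single lock-step pass: advance a gt iterator alongside the pred rows
--     it_g = iter(gt_rows)
--     for p in pred_rows:
--         g = next(it_g, None)
--         if g is None or len(p) != w or len(p) != len(g):
--             return False
--     return next(it_g, None) is None
-- ===== Notes on version B (the rewrite author's own statement) =====
-- stated objective: alternative
-- what changed: B replaces A's three staged scans (uniform-width comprehension, row-count comparison, indexed width comparison) with one lock-step pass that advances a gt iterator alongside the pred rows, checking uniform width, pairwise width match and simultaneous exhaustion with early exit.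
import Mathlib
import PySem

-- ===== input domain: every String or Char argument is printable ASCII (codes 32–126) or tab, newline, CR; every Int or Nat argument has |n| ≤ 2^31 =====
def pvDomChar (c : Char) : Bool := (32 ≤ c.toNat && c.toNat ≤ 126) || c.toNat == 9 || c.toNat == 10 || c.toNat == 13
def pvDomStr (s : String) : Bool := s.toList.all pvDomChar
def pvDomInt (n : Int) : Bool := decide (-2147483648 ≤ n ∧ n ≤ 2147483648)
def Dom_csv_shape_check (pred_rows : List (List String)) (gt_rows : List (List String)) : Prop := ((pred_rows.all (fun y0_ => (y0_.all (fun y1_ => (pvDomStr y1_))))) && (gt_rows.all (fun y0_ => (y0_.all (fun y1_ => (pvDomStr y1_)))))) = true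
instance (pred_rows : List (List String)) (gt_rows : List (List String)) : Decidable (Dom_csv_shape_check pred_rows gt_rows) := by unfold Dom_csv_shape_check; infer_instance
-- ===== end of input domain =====

-- B replaces A's three staged scans by a single lock-step pass over both row
-- lists together (objective: alternative decomposition, same cost).

-- ===== PORT A =====
-- Literal transliteration of A: guard, then the three checks in A's order.
-- pred_rows[i]/gt_rows[i] inside the short-circuited 'or' are ported with pyGetD;
-- they are only reached when i < len(gt_rows) = len(pred_rows), where pyGetD is exact.
def csv_shape_check (pred_rows : List (List String)) (gt_rows : List (List String)) : Bool :=
  if pred_rows.isEmpty || (pred_rows.headD []).isEmpty then false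
  else
    let num_fields := (pred_rows.headD []).length
    if (pred_rows.map (fun r => r.length == num_fields)).contains false then false
    else if pred_rows.length != gt_rows.length
            || (List.range gt_rows.length).any (fun i =>
                 (PySem.List.pyGetD pred_rows (i : Int) []).length
                   != (PySem.List.pyGetD gt_rows (i : Int) []).length) then false
    else true

-- ===== PORT B =====
-- Transliteration of Source B: the lock-step pass over pred_rows with the gt
-- iterator (next returning None at exhaustion) is csvWalk, consuming both lists
-- in step; the final 'iterator exhausted' check is the ([], []) case.
def csvWalk (w : Nat) : List (List String) → List (List String) → Bool
  | [], [] => true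
  | [], _ :: _ => false
  | _ :: _, [] => false
  | p :: ps, g :: gs => p.length == w && p.length == g.length && csvWalk w ps gs

def csv_shape_check_alt (pred_rows : List (List String)) (gt_rows : List (List String)) : Bool :=
  if pred_rows.isEmpty || (pred_rows.headD []).isEmpty then false
  else csvWalk (pred_rows.headD []).length pred_rows gt_rows

-- ===== PRECONDITION & SPEC =====
def Spec_csv_shape_check (pred_rows : List (List String)) (gt_rows : List (List String)) (out : Bool) : Prop := out = csv_shape_check_alt pred_rows gt_rows
instance (pred_rows : List (List String)) (gt_rows : List (List String)) (out : Bool) : Decidable (Spec_csv_shape_check pred_rows gt_rows out) := by unfold Spec_csv_shape_check; infer_instance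

-- ===== CLAIM =====
def Claim_equal_csv_shape_check : Prop := ∀ (pred_rows : List (List String)) (gt_rows : List (List String)), Dom_csv_shape_check pred_rows gt_rows → Spec_csv_shape_check pred_rows gt_rows (csv_shape_check pred_rows gt_rows)

-- ===== LEMMAS AND PROOFS =====

-- the lock-step walk succeeds iff widths are uniformly w and the shape vectors agree
lemma pv_walk_iff (w : Nat) (ps gs : List (List String)) :
    csvWalk w ps gs = true ↔
      (ps.map List.length = gs.map List.length ∧ ∀ x ∈ ps, x.length = w) := by
  induction ps generalizing gs with
  | nil => cases gs <;> simp [csvWalk]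
  | cons p ps ih =>
    cases gs with
    | nil => simp [csvWalk]
    | cons g gs =>
      simp only [csvWalk, Bool.and_eq_true, beq_iff_eq, ih, List.map_cons,
        List.cons.injEq, List.mem_cons]
      constructor
      · rintro ⟨⟨h1, h2⟩, h3, h4⟩
        exact ⟨⟨h2, h3⟩, fun x hx => hx.elim (fun h => h ▸ h1) (h4 x)⟩
      · rintro ⟨⟨h2, h3⟩, h4⟩
        exact ⟨⟨h4 p (Or.inl rfl), h2⟩, h3, fun x hx => h4 x (Or.inr hx)⟩

-- shape-vector equality ↔ same row count and pointwise equal widths (as A tests them)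
lemma pv_map_len_eq (p g : List (List String)) :
    (p.map List.length = g.map List.length) ↔
      (p.length = g.length ∧
        ∀ i < g.length, (p.getD i []).length = (g.getD i []).length) := by
  induction p generalizing g with
  | nil =>
    cases g <;> simp
  | cons r rs ih =>
    cases g with
    | nil => simp
    | cons t ts =>
      constructor
      · intro h
        simp only [List.map_cons, List.cons.injEq] at h
        obtain ⟨h1, h2⟩ := h
        have := (ih ts).mp h2
        refine ⟨by simpa using this.1, ?_⟩
        intro i hi
        cases i with
        | zero => simpa using h1
        | succ j =>
          simp only [List.getD_cons_succ]
          exact this.2 j (by simpa using hi)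
      · rintro ⟨h1, h2⟩
        simp only [List.map_cons, List.cons.injEq]
        refine ⟨by simpa using h2 0 (by simp), (ih ts).mpr ⟨by simpa using h1, ?_⟩⟩
        intro j hj
        have := h2 (j + 1) (by simpa using Nat.succ_lt_succ hj)
        simpa using this

theorem pv_main (p g : List (List String)) :
    csv_shape_check p g = csv_shape_check_alt p g := by
  cases p with
  | nil => simp [csv_shape_check, csv_shape_check_alt]
  | cons r rs =>
    by_cases hr : r = []
    · subst hr; simp [csv_shape_check, csv_shape_check_alt]
    · rw [Bool.eq_iff_iff]
      have hA : csv_shape_check (r :: rs) g = true ↔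
          ((∀ row ∈ r :: rs, row.length = r.length) ∧
            (r :: rs).length = g.length ∧
            ∀ i < g.length, ((r :: rs).getD i []).length = (g.getD i []).length) := by
        simp only [csv_shape_check, List.isEmpty_cons, List.headD_cons, Bool.false_or]
        rw [if_neg (by simp [hr])]
        split_ifs with h1 h2
        · simp only [false_iff]
          rintro ⟨hall, -, -⟩
          simp only [List.contains_eq_mem, List.mem_map, decide_eq_true_eq] at h1
          obtain ⟨row, hrow, hb⟩ := h1
          exact absurd (hall row hrow) (by simpa using hb)
        · simp only [false_iff]
          rintro ⟨-, hlen, hpt⟩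
          simp only [Bool.or_eq_true, bne_iff_ne, List.any_eq_true, List.mem_range] at h2
          rcases h2 with h2 | ⟨i, hi, hne⟩
          · exact h2 hlen
          · exact hne (by simpa [PySem.List.pyGetD_natCast, List.getD] using hpt i hi)
        · simp only [true_iff]
          simp only [Bool.or_eq_true, bne_iff_ne, List.any_eq_true, List.mem_range,
            not_or, not_exists, not_and] at h2
          obtain ⟨hlen, hpt⟩ := h2
          refine ⟨?_, not_ne_iff.mp hlen, ?_⟩
          · intro row hrow
            by_contra hne
            exact h1 (by
              simp only [List.contains_eq_mem, List.mem_map, decide_eq_true_eq]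
              exact ⟨row, hrow, by simp [hne]⟩)
          · intro i hi
            have := hpt i hi
            simp only [PySem.List.pyGetD_natCast, not_not] at this
            simpa [List.getD] using this
      have hB : csv_shape_check_alt (r :: rs) g = true ↔
          (((r :: rs).map List.length = g.map List.length) ∧
            ∀ x ∈ r :: rs, x.length = r.length) := by
        simp only [csv_shape_check_alt, List.isEmpty_cons, List.headD_cons, Bool.false_or]
        rw [if_neg (by simp [hr])]
        exact pv_walk_iff r.length (r :: rs) g
      rw [hA, hB, pv_map_len_eq]
      tauto

-- ===== VERDICT =====
theorem csv_shape_check_spec : Claim_equal_csv_shape_check := by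
  intro p g _
  unfold Spec_csv_shape_check
  exact pv_main p g
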